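-- pv_equiv track=rewrite | github.com/znak13/XBRL_SCHA_Prirost | module/adjustments.py | pasport_from_str
-- ===== SOURCE A (Python) =====
-- def pasport_from_str(pasport: str):
--     """Найти серию и номер паспорта в тексте"""
--
--     txt_lst = pasport.split()
--     seriya = ''
--     nomer = ''
--     for word in txt_lst:
--         # удаляем точку и запятую в конце строки
--         word = word.rstrip('.')
--         word = word.rstrip(',')
--         # слово состоит из цифр и
--         # серия паспорта не определена либо состоит только из 2-х знаков
--         if word.isdigit() and (not seriya or len(seriya) == 2):
--             seriya = seriya + word
--             continue
--         # слово состоит из цифр и серия паспорта определена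
--         if word.isdigit() and seriya:
--             nomer = word
--             break
--     return seriya + '_' * bool(nomer) + nomer
-- ===== SOURCE B (Python) =====
-- def pasport_from_str(pasport: str):
--     """Найти серию и номер паспорта в тексте (filter-then-index re-implementation)"""
--     tokens = []
--     for w in pasport.split():
--         c = w.rstrip('.').rstrip(',')
--         if c.isdigit():
--             tokens.append(c)
--     if not tokens:
--         return ''
--     seriya = tokens[0]
--     idx = 1
--     if len(seriya) == 2 and len(tokens) > 1:
--         seriya += tokens[1]
--         idx = 2
--     nomer = tokens[idx] if len(tokens) > idx else ''
--     return seriya + '_' * bool(nomer) + nomer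
-- ===== Notes on version B (the rewrite author's own statement) =====
-- stated objective: simpler
-- what changed: Replaces the stateful loop with break/continue and series-length-dependent branching by a single filter pass that collects cleaned digit tokens followed by plain index selection of series and number.
import Mathlib
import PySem

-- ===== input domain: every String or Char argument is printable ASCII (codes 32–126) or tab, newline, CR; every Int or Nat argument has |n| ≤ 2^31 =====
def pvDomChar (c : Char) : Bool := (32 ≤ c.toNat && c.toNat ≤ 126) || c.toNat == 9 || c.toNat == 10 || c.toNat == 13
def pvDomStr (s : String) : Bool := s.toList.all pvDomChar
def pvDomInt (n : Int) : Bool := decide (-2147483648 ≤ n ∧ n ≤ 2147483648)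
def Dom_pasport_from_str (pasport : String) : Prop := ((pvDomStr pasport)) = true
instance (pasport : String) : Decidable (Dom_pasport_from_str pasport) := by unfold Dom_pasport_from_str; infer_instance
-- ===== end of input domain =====

-- B replaces A's stateful loop (break/continue, length-dependent state) by a filter pass
-- collecting cleaned digit tokens plus index selection; objective: simpler, same cost.

-- shared helper: w.rstrip(ch) for a single strip character — exact: drops trailing copies of ch
def pvRstrip1 (cs : List Char) (ch : Char) : List Char :=
  (cs.reverse.dropWhile (· == ch)).reverse

-- ===== PORT A =====
-- the for-loop of A: state = (seriya, nomer); 'break' returns, 'continue' recurses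
def pvLoopA : List (List Char) → List Char → List Char × List Char
  | [], seriya => (seriya, [])
  | w :: ws, seriya =>
    let w1 := pvRstrip1 w '.'
    let w2 := pvRstrip1 w1 ','
    if PySem.Chars.strIsdigit w2 && (decide (seriya = []) || decide (seriya.length = 2)) then
      pvLoopA ws (seriya ++ w2)
    else if PySem.Chars.strIsdigit w2 && decide (¬ seriya = []) then
      (seriya, w2)
    else
      pvLoopA ws seriya

def pasport_from_str (pasport : String) : String :=
  let r := pvLoopA (PySem.Chars.split₀ pasport.toList) []
  String.ofList (r.1 ++ (if r.2 ≠ [] then ['_'] else []) ++ r.2)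

-- ===== PORT B =====
-- Source B's cleaning of one word: the cleaned token when it is all digits, else none
def pvCleanDigit? (w : List Char) : Option (List Char) :=
  let c := pvRstrip1 (pvRstrip1 w '.') ','
  if PySem.Chars.strIsdigit c then some c else none

def pasport_from_str_alt (pasport : String) : String :=
  let tokens := (PySem.Chars.split₀ pasport.toList).filterMap pvCleanDigit?
  if tokens.isEmpty then "" else
  let s0 := tokens.getD 0 []
  let si := if s0.length = 2 ∧ 1 < tokens.length then (s0 ++ tokens.getD 1 [], (2 : Nat)) else (s0, 1)
  let nomer := if si.2 < tokens.length then tokens.getD si.2 [] else []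
  String.ofList (si.1 ++ (if nomer ≠ [] then ['_'] else []) ++ nomer)

-- ===== PRECONDITION & SPEC =====
def Spec_pasport_from_str (pasport : String) (out : String) : Prop := out = pasport_from_str_alt pasport
instance (pasport : String) (out : String) : Decidable (Spec_pasport_from_str pasport out) := by unfold Spec_pasport_from_str; infer_instance

-- ===== CLAIM (what is proved, stated in full; the proofs are below) =====
def Claim_equal_pasport_from_str : Prop := ∀ (pasport : String), Dom_pasport_from_str pasport → Spec_pasport_from_str pasport (pasport_from_str pasport)

-- ===== LEMMAS AND PROOFS =====

-- characterisation of A's loop result as a function of the digit-token list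
def pvStep : List Char → List (List Char) → List Char × List Char
  | s, [] => (s, [])
  | s, t :: ts => if s = [] then pvStep t ts else if s.length = 2 then (s ++ t, ts.headD []) else (s, t)

theorem strIsdigit_ne_nil {cs : List Char} (h : PySem.Chars.strIsdigit cs = true) : cs ≠ [] := by
  intro hn; subst hn; simp [PySem.Chars.strIsdigit] at h

theorem pvStep_of_ne (s : List Char) (l : List (List Char)) (h1 : s ≠ []) (h2 : s.length ≠ 2) :
    pvStep s l = (s, l.headD []) := by
  cases l with
  | nil => rfl
  | cons t ts => simp [pvStep, h1, h2]

theorem pvCleanDigit?_pos {w : List Char}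
    (hd : PySem.Chars.strIsdigit (pvRstrip1 (pvRstrip1 w '.') ',') = true) :
    pvCleanDigit? w = some (pvRstrip1 (pvRstrip1 w '.') ',') := by
  simp [pvCleanDigit?, hd]

theorem pvCleanDigit?_neg {w : List Char}
    (hd : PySem.Chars.strIsdigit (pvRstrip1 (pvRstrip1 w '.') ',') = false) :
    pvCleanDigit? w = none := by
  simp [pvCleanDigit?, hd]

theorem pvLoopA_eq_pvStep (ws : List (List Char)) (s : List Char) :
    pvLoopA ws s = pvStep s (ws.filterMap pvCleanDigit?) := by
  induction ws generalizing s with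
  | nil => rfl
  | cons w ws ih =>
    by_cases hd : PySem.Chars.strIsdigit (pvRstrip1 (pvRstrip1 w '.') ',') = true
    · have hne := strIsdigit_ne_nil hd
      simp only [List.filterMap_cons, pvCleanDigit?_pos hd]
      by_cases hs : s = []
      · subst hs
        simp only [pvLoopA, hd, decide_true, Bool.true_or, Bool.and_true, if_pos, pvStep]
        rw [ih]; rfl
      · by_cases hl : s.length = 2
        · have h1 : s ++ pvRstrip1 (pvRstrip1 w '.') ',' ≠ [] := by
            intro h; exact hs (List.append_eq_nil_iff.mp h).1
          have h2 : (s ++ pvRstrip1 (pvRstrip1 w '.') ',').length ≠ 2 := by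
            have hc0 : 0 < (pvRstrip1 (pvRstrip1 w '.') ',').length := List.length_pos_iff.mpr hne
            rw [List.length_append, hl]; omega
          simp only [pvLoopA, hd, hs, hl, decide_true, decide_false, Bool.false_or,
            Bool.and_true, if_pos]
          rw [ih, pvStep_of_ne _ _ h1 h2]
          simp [pvStep, hs, hl]
        · simp only [pvLoopA, hd, hs, hl, decide_true, decide_false, Bool.false_or,
            Bool.and_false, Bool.true_and, not_false_iff, if_neg, if_pos, Bool.false_eq_true]
          simp [pvStep, hs, hl]
    · have hd' : PySem.Chars.strIsdigit (pvRstrip1 (pvRstrip1 w '.') ',') = false := by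
        simpa using hd
      simp only [List.filterMap_cons, pvCleanDigit?_neg hd', pvLoopA, hd', Bool.false_and,
        if_neg, Bool.false_eq_true, not_false_iff]
      exact ih s

theorem pasport_from_str_spec : Claim_equal_pasport_from_str := by
  intro p _
  unfold Spec_pasport_from_str pasport_from_str pasport_from_str_alt
  rw [pvLoopA_eq_pvStep]
  have hne : ∀ t ∈ (PySem.Chars.split₀ p.toList).filterMap pvCleanDigit?, t ≠ [] := by
    intro t ht
    rcases List.mem_filterMap.mp ht with ⟨w, _, hw⟩
    simp only [pvCleanDigit?] at hw
    split at hw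
    · cases hw; exact strIsdigit_ne_nil (by assumption)
    · cases hw
  rcases hts : (PySem.Chars.split₀ p.toList).filterMap pvCleanDigit? with _ | ⟨t0, _ | ⟨t1, ts⟩⟩
  · rfl
  · simp [pvStep, List.getD]
  · have h0 : t0 ≠ [] := hne t0 (by rw [hts]; simp)
    by_cases h2 : t0.length = 2
    · cases ts with
      | nil => simp [pvStep, h0, h2, List.getD]
      | cons t2 ts' => simp [pvStep, h0, h2, List.getD]
    · simp [pvStep, h0, h2, List.getD]
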